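-- pv_equiv track=rewrite | github.com/JoshEngels/HexGrids | josh_test_files/best3.py | generate_all_old
-- ===== SOURCE A (Python) =====
-- def generate_all_old(index, length_this, max_value, length_last, needs):
--
--
--     if index == length_this:
--         return [[]]
--
--     result = []
--     one_step_down = generate_all_old(index + 1, length_this, max_value, length_last, needs)
--
--     for i in range(1, max_value + 1):
--         for toAdd in one_step_down:
--             temp = list(toAdd)
--             temp.insert(0, i)
--
--             if length_last < length_this:
--                 if index < length_this - 1 and index in needs:
--                     need = set(needs[index])
--                     need.discard(temp[0])
--                     need.discard(temp[1])
--                     if not not need: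
--                         continue
--
--             else:
--                 if index + 1 in needs:
--                     need = set(needs[index + 1])
--                     need.discard(temp[0])
--                     if len(temp) > 1:
--                         need.discard(temp[1])
--                     if not not need:
--                         continue
--
--                 if index == 0 and index in needs:
--                     need = set(needs[index])
--                     need.discard(temp[0])
--                     if not not need:
--                         continue
--
--             result.append(temp)
--
--     return result
-- ===== SOURCE B (Python) =====
-- # B: bottom-up iteration over levels instead of recursion; the per-element filter
-- # tests needs-lists directly with any() instead of building and discarding from a set.
-- def _keeps(idx, length_this, length_last, needs, temp):
--     if length_last < length_this:
--         if idx < length_this - 1 and idx in needs: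
--             if any(v != temp[0] and v != temp[1] for v in needs[idx]):
--                 return False
--     else:
--         if idx + 1 in needs:
--             if any(v != temp[0] and (len(temp) <= 1 or v != temp[1]) for v in needs[idx + 1]):
--                 return False
--         if idx == 0 and idx in needs:
--             if any(v != temp[0] for v in needs[idx]):
--                 return False
--     return True
--
--
-- def generate_all_old(index, length_this, max_value, length_last, needs):
--     results = [[]]
--     for idx in range(length_this - 1, index - 1, -1):
--         new_results = []
--         for i in range(1, max_value + 1):
--             for toAdd in results:
--                 temp = [i] + toAdd
--                 if _keeps(idx, length_this, length_last, needs, temp):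
--                     new_results.append(temp)
--         results = new_results
--     return results
-- ===== Notes on version B (the rewrite author's own statement) =====
-- stated objective: alternative
-- what changed: B replaces A's top-down recursion with a bottom-up loop over levels (results built from the base case upward) and replaces A's set-build-then-discard emptiness test with a direct any() scan over the needs-lists.
import Mathlib
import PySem

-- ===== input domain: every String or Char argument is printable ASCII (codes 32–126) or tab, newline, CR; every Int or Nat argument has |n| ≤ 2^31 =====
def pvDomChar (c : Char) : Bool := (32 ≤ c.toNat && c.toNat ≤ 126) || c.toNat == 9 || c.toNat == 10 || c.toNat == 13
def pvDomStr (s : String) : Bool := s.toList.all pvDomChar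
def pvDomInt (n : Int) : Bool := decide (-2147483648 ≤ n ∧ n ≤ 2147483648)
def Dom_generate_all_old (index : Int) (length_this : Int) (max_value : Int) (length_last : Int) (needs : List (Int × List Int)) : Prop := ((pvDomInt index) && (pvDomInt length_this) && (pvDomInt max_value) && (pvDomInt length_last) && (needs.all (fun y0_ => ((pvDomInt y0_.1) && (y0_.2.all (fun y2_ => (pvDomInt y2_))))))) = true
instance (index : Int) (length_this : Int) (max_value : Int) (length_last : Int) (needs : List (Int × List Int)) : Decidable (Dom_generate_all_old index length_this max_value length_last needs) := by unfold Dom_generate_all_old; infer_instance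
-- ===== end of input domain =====

-- B replaces A's top-down recursion by a bottom-up loop over levels and tests the
-- needs-lists directly with any() instead of building a set and discarding from it (objective: alternative).

-- ===== PORT A =====
-- one level of A's recursion: the body after the recursive call (the double for-loop with the filter)
def aStep (index : Int) (length_this : Int) (length_last : Int) (needs : List (Int × List Int)) (max_value : Int) (one_step_down : List (List Int)) : List (List Int) :=
  (PySem.List.pyRange 1 (max_value + 1) 1).foldl (fun result i =>
    one_step_down.foldl (fun result toAdd =>
      -- temp = list(toAdd); temp.insert(0, i)  (insert at 0 = prepend, exact)
      let temp : List Int := i :: toAdd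
      if length_last < length_this then
        if index < length_this - 1 ∧ (PySem.Dict.mk needs).contains index then
          -- need = set(needs[index]); need.discard(temp[0]); need.discard(temp[1])
          -- (temp[0]/temp[1] via pyGetD: both accesses are in range on every input admitted by Pre_)
          let need : PySem.Set Int :=
            PySem.Set.discard (PySem.Set.discard
              (PySem.Set.ofList (((PySem.Dict.mk needs).get? index).getD []))
              (PySem.List.pyGetD temp 0 0)) (PySem.List.pyGetD temp 1 0)
          if need ≠ [] then result else result ++ [temp]
        else result ++ [temp]
      else
        if (PySem.Dict.mk needs).contains (index + 1) ∧
            (let need1 := PySem.Set.discard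
                (PySem.Set.ofList (((PySem.Dict.mk needs).get? (index + 1)).getD []))
                (PySem.List.pyGetD temp 0 0)
             (if (temp.length : Int) > 1 then PySem.Set.discard need1 (PySem.List.pyGetD temp 1 0) else need1) ≠ []) then
          result
        else if index = 0 ∧ (PySem.Dict.mk needs).contains index ∧
            PySem.Set.discard (PySem.Set.ofList (((PySem.Dict.mk needs).get? index).getD []))
              (PySem.List.pyGetD temp 0 0) ≠ [] then
          result
        else result ++ [temp]) result) []

-- A's recursion, driven by fuel = length_this - index (exact recursion depth for index ≤ length_this)
def aGo (length_this : Int) (max_value : Int) (length_last : Int) (needs : List (Int × List Int)) : Nat → Int → List (List Int)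
  | 0, _ => [[]]
  | n + 1, index =>
    if index = length_this then [[]]
    else aStep index length_this length_last needs max_value
      (aGo length_this max_value length_last needs n (index + 1))

def generate_all_old (index : Int) (length_this : Int) (max_value : Int) (length_last : Int) (needs : List (Int × List Int)) : List (List Int) :=
  aGo length_this max_value length_last needs (length_this - index).toNat index

-- ===== PORT B =====
def bKeeps (idx : Int) (length_this : Int) (length_last : Int) (needs : List (Int × List Int)) (temp : List Int) : Bool :=
  if length_last < length_this then
    if idx < length_this - 1 ∧ (PySem.Dict.mk needs).contains idx then
      ! (((PySem.Dict.mk needs).get? idx).getD []).any (fun v =>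
          decide (v ≠ PySem.List.pyGetD temp 0 0) && decide (v ≠ PySem.List.pyGetD temp 1 0))
    else true
  else
    (if (PySem.Dict.mk needs).contains (idx + 1) then
      ! (((PySem.Dict.mk needs).get? (idx + 1)).getD []).any (fun v =>
          decide (v ≠ PySem.List.pyGetD temp 0 0) &&
            (decide ((temp.length : Int) ≤ 1) || decide (v ≠ PySem.List.pyGetD temp 1 0)))
     else true)
    &&
    (if idx = 0 ∧ (PySem.Dict.mk needs).contains idx then
      ! (((PySem.Dict.mk needs).get? idx).getD []).any (fun v => decide (v ≠ PySem.List.pyGetD temp 0 0))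
     else true)

def generate_all_old_alt (index : Int) (length_this : Int) (max_value : Int) (length_last : Int) (needs : List (Int × List Int)) : List (List Int) :=
  (PySem.List.pyRange (length_this - 1) (index - 1) (-1)).foldl (fun results idx =>
    (PySem.List.pyRange 1 (max_value + 1) 1).foldl (fun acc i =>
      results.foldl (fun acc toAdd =>
        let temp : List Int := i :: toAdd
        if bKeeps idx length_this length_last needs temp then acc ++ [temp] else acc) acc) []) [[]]

-- ===== PRECONDITION & SPEC =====
-- Pre_ excludes index > length_this, on which A's recursion never reaches the base case (Python RecursionError).
def Pre_generate_all_old (index : Int) (length_this : Int) (max_value : Int) (length_last : Int) (needs : List (Int × List Int)) : Prop :=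
  index ≤ length_this
instance (index : Int) (length_this : Int) (max_value : Int) (length_last : Int) (needs : List (Int × List Int)) : Decidable (Pre_generate_all_old index length_this max_value length_last needs) := by unfold Pre_generate_all_old; infer_instance

def pvWitness_generate_all_old : Int × Int × Int × Int × (List (Int × List Int)) := (0, 2, 2, 2, [(1, [1])])

def Spec_generate_all_old (index : Int) (length_this : Int) (max_value : Int) (length_last : Int) (needs : List (Int × List Int)) (out : List (List Int)) : Prop := out = generate_all_old_alt index length_this max_value length_last needs
instance (index : Int) (length_this : Int) (max_value : Int) (length_last : Int) (needs : List (Int × List Int)) (out : List (List Int)) : Decidable (Spec_generate_all_old index length_this max_value length_last needs out) := by unfold Spec_generate_all_old; infer_instance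

-- ===== CLAIM (what is proved, stated in full; the proofs are below) =====
def Claim_equal_generate_all_old : Prop := ∀ (index : Int) (length_this : Int) (max_value : Int) (length_last : Int) (needs : List (Int × List Int)), Dom_generate_all_old index length_this max_value length_last needs → Pre_generate_all_old index length_this max_value length_last needs → Spec_generate_all_old index length_this max_value length_last needs (generate_all_old index length_this max_value length_last needs)

-- ===== LEMMAS AND PROOFS =====

-- set(l) with a then b discarded is empty iff every element of l is a or b
lemma discard2_eq_nil_iff (l : List Int) (a b : Int) :
    PySem.Set.discard (PySem.Set.discard (PySem.Set.ofList l) a) b = [] ↔ ∀ v ∈ l, v = a ∨ v = b := by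
  rw [List.eq_nil_iff_forall_not_mem]
  constructor
  · intro h v hv
    by_contra hc
    push_neg at hc
    exact h v (by rw [PySem.Set.mem_discard, PySem.Set.mem_discard, PySem.Set.mem_ofList]; exact ⟨⟨hv, hc.1⟩, hc.2⟩)
  · intro h v hv
    rw [PySem.Set.mem_discard, PySem.Set.mem_discard, PySem.Set.mem_ofList] at hv
    rcases h v hv.1.1 with h' | h'
    · exact hv.1.2 h'
    · exact hv.2 h'

lemma discard1_eq_nil_iff (l : List Int) (a : Int) :
    PySem.Set.discard (PySem.Set.ofList l) a = [] ↔ ∀ v ∈ l, v = a := by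
  rw [List.eq_nil_iff_forall_not_mem]
  constructor
  · intro h v hv
    by_contra hc
    exact h v (by rw [PySem.Set.mem_discard, PySem.Set.mem_ofList]; exact ⟨hv, hc⟩)
  · intro h v hv
    rw [PySem.Set.mem_discard, PySem.Set.mem_ofList] at hv
    exact hv.2 (h v hv.1)

-- bKeeps under each comparison of length_last with length_this
lemma bKeeps_lt {idx length_this length_last : Int} {needs : List (Int × List Int)} {temp : List Int}
    (h1 : length_last < length_this) :
    bKeeps idx length_this length_last needs temp =
    (if idx < length_this - 1 ∧ (PySem.Dict.mk needs).contains idx then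
      ! (((PySem.Dict.mk needs).get? idx).getD []).any (fun v =>
          decide (v ≠ PySem.List.pyGetD temp 0 0) && decide (v ≠ PySem.List.pyGetD temp 1 0))
    else true) := by
  unfold bKeeps; rw [if_pos h1]

lemma bKeeps_ge {idx length_this length_last : Int} {needs : List (Int × List Int)} {temp : List Int}
    (h1 : ¬ length_last < length_this) :
    bKeeps idx length_this length_last needs temp =
    ((if (PySem.Dict.mk needs).contains (idx + 1) then
      ! (((PySem.Dict.mk needs).get? (idx + 1)).getD []).any (fun v =>
          decide (v ≠ PySem.List.pyGetD temp 0 0) &&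
            (decide ((temp.length : Int) ≤ 1) || decide (v ≠ PySem.List.pyGetD temp 1 0)))
     else true)
    &&
    (if idx = 0 ∧ (PySem.Dict.mk needs).contains idx then
      ! (((PySem.Dict.mk needs).get? idx).getD []).any (fun v => decide (v ≠ PySem.List.pyGetD temp 0 0))
     else true)) := by
  unfold bKeeps; rw [if_neg h1]

lemma discard1_eq_nil_iff_any (l : List Int) (a : Int) :
    PySem.Set.discard (PySem.Set.ofList l) a = [] ↔ (l.any (fun v => decide (v ≠ a)) = false) := by
  rw [discard1_eq_nil_iff, List.any_eq_false]
  constructor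
  · intro h v hv; simp [h v hv]
  · intro h v hv
    have hvv := h v hv
    by_contra hc
    simp [hc] at hvv

lemma cond_discard_eq_nil_iff (l : List Int) (a b n : Int) :
    ((if n > 1 then PySem.Set.discard (PySem.Set.discard (PySem.Set.ofList l) a) b
      else PySem.Set.discard (PySem.Set.ofList l) a) = []) ↔
    (l.any (fun v => decide (v ≠ a) && (decide (n ≤ 1) || decide (v ≠ b))) = false) := by
  by_cases hlen : n > 1
  · rw [if_pos hlen, discard2_eq_nil_iff, List.any_eq_false]
    have hl : ¬(n ≤ 1) := by omega
    constructor
    · intro h v hv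
      rcases h v hv with h' | h' <;> simp [h', hl]
    · intro h v hv
      have hvv := h v hv
      by_contra hc
      push_neg at hc
      simp [hc.1, hc.2, hl] at hvv
  · rw [if_neg hlen, discard1_eq_nil_iff, List.any_eq_false]
    have hl : n ≤ 1 := by omega
    constructor
    · intro h v hv
      simp [h v hv]
    · intro h v hv
      have hvv := h v hv
      by_contra hc
      simp [hc, hl] at hvv

-- A's per-element branch structure computes exactly "append iff bKeeps"
lemma body_eq (idx length_this length_last : Int) (needs : List (Int × List Int))
    (result : List (List Int)) (i : Int) (toAdd : List Int) :
    (if length_last < length_this then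
        if idx < length_this - 1 ∧ (PySem.Dict.mk needs).contains idx then
          if PySem.Set.discard (PySem.Set.discard
              (PySem.Set.ofList (((PySem.Dict.mk needs).get? idx).getD []))
              (PySem.List.pyGetD (i :: toAdd) 0 0)) (PySem.List.pyGetD (i :: toAdd) 1 0) ≠ [] then
            result
          else result ++ [i :: toAdd]
        else result ++ [i :: toAdd]
      else
        if (PySem.Dict.mk needs).contains (idx + 1) ∧
            ((if (((i :: toAdd).length : Int) > 1) then
                PySem.Set.discard (PySem.Set.discard
                  (PySem.Set.ofList (((PySem.Dict.mk needs).get? (idx + 1)).getD []))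
                  (PySem.List.pyGetD (i :: toAdd) 0 0)) (PySem.List.pyGetD (i :: toAdd) 1 0)
              else PySem.Set.discard
                  (PySem.Set.ofList (((PySem.Dict.mk needs).get? (idx + 1)).getD []))
                  (PySem.List.pyGetD (i :: toAdd) 0 0)) ≠ []) then
          result
        else if idx = 0 ∧ (PySem.Dict.mk needs).contains idx ∧
            PySem.Set.discard (PySem.Set.ofList (((PySem.Dict.mk needs).get? idx).getD []))
              (PySem.List.pyGetD (i :: toAdd) 0 0) ≠ [] then
          result
        else result ++ [i :: toAdd]) =
    (if bKeeps idx length_this length_last needs (i :: toAdd) then result ++ [i :: toAdd] else result) := by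
  by_cases h1 : length_last < length_this
  · rw [if_pos h1, bKeeps_lt h1]
    simp only [PySem.List.pyGetD_zero_cons]
    by_cases h2 : idx < length_this - 1 ∧ (PySem.Dict.mk needs).contains idx
    · rw [if_pos h2, if_pos h2]
      by_cases h3 : PySem.Set.discard (PySem.Set.discard
          (PySem.Set.ofList (((PySem.Dict.mk needs).get? idx).getD [])) i)
          (PySem.List.pyGetD (i :: toAdd) 1 0) = []
      · have ha : (((PySem.Dict.mk needs).get? idx).getD []).any (fun v =>
            decide (v ≠ i) && decide (v ≠ PySem.List.pyGetD (i :: toAdd) 1 0)) = false := by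
          rw [List.any_eq_false]
          intro v hv
          rcases (discard2_eq_nil_iff _ _ _).mp h3 v hv with h | h <;> simp [h]
        rw [if_neg (not_not_intro h3), ha]
        rfl
      · have ha : (((PySem.Dict.mk needs).get? idx).getD []).any (fun v =>
            decide (v ≠ i) && decide (v ≠ PySem.List.pyGetD (i :: toAdd) 1 0)) = true := by
          cases h : (((PySem.Dict.mk needs).get? idx).getD []).any (fun v =>
            decide (v ≠ i) && decide (v ≠ PySem.List.pyGetD (i :: toAdd) 1 0))
          · refine absurd ?_ h3
            rw [discard2_eq_nil_iff]
            intro v hv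
            have hvv := (List.any_eq_false.mp h) v hv
            by_contra hc
            push_neg at hc
            simp [hc.1, hc.2] at hvv
          · rfl
        rw [if_pos h3, ha]
        rfl
    · rw [if_neg h2, if_neg h2]
      rfl
  · rw [if_neg h1, bKeeps_ge h1]
    simp only [PySem.List.pyGetD_zero_cons]
    have key1 := cond_discard_eq_nil_iff (((PySem.Dict.mk needs).get? (idx + 1)).getD [])
      i (PySem.List.pyGetD (i :: toAdd) 1 0) (((i :: toAdd).length : Int))
    have key2 := discard1_eq_nil_iff_any (((PySem.Dict.mk needs).get? idx).getD []) i
    by_cases hb1 : (PySem.Dict.mk needs).contains (idx + 1) ∧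
        ((if (((i :: toAdd).length : Int) > 1) then
            PySem.Set.discard (PySem.Set.discard
              (PySem.Set.ofList (((PySem.Dict.mk needs).get? (idx + 1)).getD [])) i)
              (PySem.List.pyGetD (i :: toAdd) 1 0)
          else PySem.Set.discard
              (PySem.Set.ofList (((PySem.Dict.mk needs).get? (idx + 1)).getD [])) i) ≠ [])
    case pos =>
      have ha1 : ((((PySem.Dict.mk needs).get? (idx + 1)).getD []).any (fun v =>
          decide (v ≠ i) &&
            (decide (((i :: toAdd).length : Int) ≤ 1) || decide (v ≠ PySem.List.pyGetD (i :: toAdd) 1 0)))) = true := by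
        cases h : ((((PySem.Dict.mk needs).get? (idx + 1)).getD []).any (fun v =>
          decide (v ≠ i) &&
            (decide (((i :: toAdd).length : Int) ≤ 1) || decide (v ≠ PySem.List.pyGetD (i :: toAdd) 1 0))))
        · exact absurd (key1.mpr h) hb1.2
        · rfl
      rw [if_pos hb1, if_pos hb1.1, ha1]
      rfl
    case neg =>
      rw [if_neg hb1]
      have hfac1 : (if (PySem.Dict.mk needs).contains (idx + 1) then
          ! ((((PySem.Dict.mk needs).get? (idx + 1)).getD []).any (fun v =>
            decide (v ≠ i) &&
              (decide (((i :: toAdd).length : Int) ≤ 1) || decide (v ≠ PySem.List.pyGetD (i :: toAdd) 1 0))))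
        else true) = true := by
        by_cases hc1 : (PySem.Dict.mk needs).contains (idx + 1)
        · have he1 := not_not.mp (fun h => hb1 ⟨hc1, h⟩)
          rw [if_pos hc1, key1.mp he1]
          rfl
        · rw [if_neg hc1]
      rw [hfac1, Bool.true_and]
      by_cases hb2 : idx = 0 ∧ (PySem.Dict.mk needs).contains idx ∧
          PySem.Set.discard (PySem.Set.ofList (((PySem.Dict.mk needs).get? idx).getD [])) i ≠ []
      case pos =>
        have ha2 : ((((PySem.Dict.mk needs).get? idx).getD []).any (fun v => decide (v ≠ i))) = true := by
          cases h : ((((PySem.Dict.mk needs).get? idx).getD []).any (fun v => decide (v ≠ i)))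
          · exact absurd (key2.mpr h) hb2.2.2
          · rfl
        have hc2 : idx = 0 ∧ (PySem.Dict.mk needs).contains idx := ⟨hb2.1, hb2.2.1⟩
        rw [if_pos hb2, if_pos hc2, ha2]
        rfl
      case neg =>
        rw [if_neg hb2]
        have hfac2 : (if idx = 0 ∧ (PySem.Dict.mk needs).contains idx then
            ! ((((PySem.Dict.mk needs).get? idx).getD []).any (fun v => decide (v ≠ i))) else true) = true := by
          by_cases hc2 : idx = 0 ∧ (PySem.Dict.mk needs).contains idx
          · have he2 := not_not.mp (fun h => hb2 ⟨hc2.1, hc2.2, h⟩)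
            rw [if_pos hc2, key2.mp he2]
            rfl
          · rw [if_neg hc2]
        rw [hfac2]
        rfl

-- one A-level equals one B-level
lemma step_eq (idx length_this length_last max_value : Int) (needs : List (Int × List Int))
    (osd : List (List Int)) :
    aStep idx length_this length_last needs max_value osd =
    (PySem.List.pyRange 1 (max_value + 1) 1).foldl (fun acc i =>
      osd.foldl (fun acc toAdd =>
        let temp : List Int := i :: toAdd
        if bKeeps idx length_this length_last needs temp then acc ++ [temp] else acc) acc) [] := by
  unfold aStep
  congr 1
  funext result i
  apply PySem.List.foldl_congr_mem
  intro acc toAdd _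
  exact body_eq idx length_this length_last needs acc i toAdd

lemma go_eq (length_this max_value length_last : Int) (needs : List (Int × List Int)) :
    ∀ (n : Nat) (index : Int), index + n = length_this →
    aGo length_this max_value length_last needs n index =
    generate_all_old_alt index length_this max_value length_last needs := by
  intro n
  induction n with
  | zero =>
    intro index h
    have : index = length_this := by omega
    subst this
    unfold aGo generate_all_old_alt
    rw [PySem.List.pyRange_neg_one_eq_nil (by omega)]
    rfl
  | succ n ih =>
    intro index h
    have hlt : index < length_this := by omega
    unfold aGo
    rw [if_neg (by omega)]
    rw [ih (index + 1) (by omega)]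
    unfold generate_all_old_alt
    have hsplit : PySem.List.pyRange (length_this - 1) (index - 1) (-1) =
        PySem.List.pyRange (length_this - 1) index (-1) ++ [index] := by
      rw [PySem.List.pyRange_neg_one_eq_reverse, PySem.List.pyRange_neg_one_eq_reverse]
      have h1 : index - 1 + 1 = index := by ring
      have h2 : length_this - 1 + 1 = length_this := by ring
      rw [h1, h2]
      rw [PySem.List.pyRange_one_cons hlt]
      simp
    rw [hsplit, List.foldl_append]
    simp only [List.foldl_cons, List.foldl_nil]
    have h1 : index + 1 - 1 = index := by ring
    rw [h1]
    exact step_eq index length_this length_last max_value needs _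

-- ===== VERDICT (by name: the statement is the Claim_ definition above) =====
theorem generate_all_old_spec : Claim_equal_generate_all_old := by
  intro index length_this max_value length_last needs _ hpre
  unfold Pre_generate_all_old at hpre
  unfold Spec_generate_all_old generate_all_old
  exact go_eq length_this max_value length_last needs (length_this - index).toNat index (by omega)
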